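-- pv_equiv track=rewrite | github.com/Taw-feeq/Learning-and-Basic-Projects | words.py | word_fit
-- ===== SOURCE A (Python) =====
-- def word_fit(k, word_list, n, m):
--     valid_words = [word for word in word_list if len(word) <= m]
--
--     def backtracking(index, lines):
--         if index == len(valid_words):
--             return sum(len(line.split()) for line in lines)
--
--         max_words = 0
--         current_word = valid_words[index]
--
--         for i in range(len(lines)):
--             if len(lines[i]) + len(current_word) + (1 if lines[i] else 0) <= m:
--                 original_line = lines[i]
--                 lines[i] += (" " if lines[i] else "") + current_word
--
--                 max_words = max(max_words, backtracking(index + 1, lines))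
--                 lines[i] = original_line
--
--         if len(lines) < n:
--             lines.append(current_word)
--             max_words = max(max_words, backtracking(index + 1, lines))
--             lines.pop()
--
--         return max_words
--
--     return backtracking(0, [])
-- ===== SOURCE B (Python) =====
-- def word_fit(k, word_list, n, m):
--     valid = [w for w in word_list if len(w) <= m]
--     total = sum(len(w.split()) for w in valid)
--
--     def feasible(i, used):
--         if i == len(valid):
--             return True
--         w = valid[i]
--         for j in range(len(used)):
--             cost = len(w) + (1 if used[j] > 0 else 0)
--             if used[j] + cost <= m:
--                 used[j] += cost
--                 ok = feasible(i + 1, used)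
--                 used[j] -= cost
--                 if ok:
--                     return True
--         if len(used) < n:
--             used.append(len(w))
--             ok = feasible(i + 1, used)
--             used.pop()
--             return ok
--         return False
--
--     return total if feasible(0, []) else 0
-- ===== Notes on version B (the rewrite author's own statement) =====
-- stated objective: alternative
-- what changed: A's backtracking maximizes a word count over all complete placements of line STRINGS (rebuilding and re-splitting lines); B computes the token total once up front and runs a short-circuiting boolean feasibility search over integer used-lengths per line, returning the total iff the packing is feasible.
import Mathlib
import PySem

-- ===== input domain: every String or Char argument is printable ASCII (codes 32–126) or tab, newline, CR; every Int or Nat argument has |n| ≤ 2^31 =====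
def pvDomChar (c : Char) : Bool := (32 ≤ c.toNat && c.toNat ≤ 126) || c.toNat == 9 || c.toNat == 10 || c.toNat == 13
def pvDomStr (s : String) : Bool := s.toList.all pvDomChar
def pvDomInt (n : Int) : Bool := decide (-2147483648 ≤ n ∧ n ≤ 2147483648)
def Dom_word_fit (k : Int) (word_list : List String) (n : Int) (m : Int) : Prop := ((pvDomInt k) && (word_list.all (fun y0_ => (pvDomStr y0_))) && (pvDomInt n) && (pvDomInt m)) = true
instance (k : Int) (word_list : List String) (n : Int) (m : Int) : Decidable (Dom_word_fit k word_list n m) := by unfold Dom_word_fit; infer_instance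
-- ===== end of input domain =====

-- B replaces A's exhaustive max-counting backtracking over mutable line strings by a
-- short-circuiting boolean feasibility search over integer used-lengths plus an upfront token total.

-- ===== PORT A =====
-- literal port of A's inner `backtracking`: state = the list of line strings, recursion on the remaining valid words
def wordFitA_bt (n m : Int) (lines : List String) (rest : List String) : Int :=
  match rest with
  | [] => (lines.map (fun l => ((PySem.Str.split₀ l).length : Int))).sum
  | w :: rest' =>
    let maxw := (List.range lines.length).foldl (fun acc i =>
        let li := lines.getD i ""
        if PySem.Str.len li + PySem.Str.len w + (if li ≠ "" then 1 else 0) ≤ m then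
          max acc (wordFitA_bt n m (lines.set i (li ++ (if li ≠ "" then " " else "") ++ w)) rest')
        else acc) 0
    if (lines.length : Int) < n then max maxw (wordFitA_bt n m (lines ++ [w]) rest') else maxw
termination_by rest.length
decreasing_by all_goals simp

def word_fit (k : Int) (word_list : List String) (n : Int) (m : Int) : Int :=
  let valid_words := word_list.filter (fun w => PySem.Str.len w ≤ m)
  wordFitA_bt n m [] valid_words

-- ===== PORT B =====
-- literal port of B's `feasible`: state = list of integer used lengths, early-exit boolean search
def wordFitB_feas (n m : Int) (used : List Int) (rest : List String) : Bool :=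
  match rest with
  | [] => true
  | w :: rest' =>
    let loop := (List.range used.length).any (fun j =>
        let uj := used.getD j 0
        let cost := PySem.Str.len w + (if uj > 0 then 1 else 0)
        if uj + cost ≤ m then wordFitB_feas n m (used.set j (uj + cost)) rest' else false)
    if loop then true
    else if (used.length : Int) < n then wordFitB_feas n m (used ++ [PySem.Str.len w]) rest'
    else false
termination_by rest.length
decreasing_by all_goals simp

def word_fit_alt (k : Int) (word_list : List String) (n : Int) (m : Int) : Int :=
  let valid := word_list.filter (fun w => PySem.Str.len w ≤ m)
  let total := (valid.map (fun w => ((PySem.Str.split₀ w).length : Int))).sum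
  if wordFitB_feas n m [] valid then total else 0

-- ===== PRECONDITION & SPEC =====
def Spec_word_fit (k : Int) (word_list : List String) (n : Int) (m : Int) (out : Int) : Prop := out = word_fit_alt k word_list n m
instance (k : Int) (word_list : List String) (n : Int) (m : Int) (out : Int) : Decidable (Spec_word_fit k word_list n m out) := by unfold Spec_word_fit; infer_instance

-- ===== CLAIM (what is proved, stated in full; the proofs are below) =====
def Claim_equal_word_fit : Prop := ∀ (k : Int) (word_list : List String) (n : Int) (m : Int), Dom_word_fit k word_list n m → Spec_word_fit k word_list n m (word_fit k word_list n m)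

-- ===== LEMMAS AND PROOFS =====

-- token count of a character list given whether a token is pending ("cur nonempty" in split₀.go)
def pvTk : List Char → Bool → Nat
  | [], e => if e then 0 else 1
  | c :: r, e => if PySem.Chars.isspace c then (if e then 0 else 1) + pvTk r true else pvTk r false

lemma pvTk_go (s : List Char) : ∀ (cur : List Char) (acc : List (List Char)),
    (PySem.Chars.split₀.go s cur acc).length = acc.length + pvTk s cur.isEmpty := by
  induction s with
  | nil =>
    intro cur acc
    unfold PySem.Chars.split₀.go pvTk
    by_cases h : cur.isEmpty <;> simp [h]
  | cons c r ih =>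
    intro cur acc
    unfold PySem.Chars.split₀.go
    by_cases hs : PySem.Chars.isspace c
    · by_cases h : cur.isEmpty <;> simp [hs, h, ih, pvTk] <;> omega
    · have hne : (c :: cur).isEmpty = false := rfl
      by_cases h : cur.isEmpty <;> simp [hs, ih, pvTk, hne]

lemma pvSplit_len (s : List Char) : (PySem.Chars.split₀ s).length = pvTk s true := by
  unfold PySem.Chars.split₀
  simpa using pvTk_go s [] []

lemma pvTk_append_space (a b : List Char) : ∀ e, pvTk (a ++ ' ' :: b) e = pvTk a e + pvTk b true := by
  induction a with
  | nil =>
    intro e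
    have hsp : PySem.Chars.isspace ' ' = true := by decide
    cases e <;> simp [pvTk, hsp]
  | cons c r ih =>
    intro e
    by_cases hs : PySem.Chars.isspace c <;> simp [pvTk, hs, ih] <;> omega

-- token count of a String, as A's `len(line.split())`
def pvTokS (s : String) : Int := ((PySem.Str.split₀ s).length : Int)

lemma pvTokS_eq (s : String) : pvTokS s = (pvTk s.toList true : Int) := by
  have h := congrArg List.length (PySem.Str.split₀_map_toList s)
  simp only [List.length_map] at h
  simp [pvTokS, h, pvSplit_len]

lemma pvTokS_nonneg (s : String) : 0 ≤ pvTokS s := by unfold pvTokS; positivity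

lemma pvToList_eq_nil (s : String) : s.toList = [] ↔ s = "" := by
  constructor
  · intro h
    have := congrArg String.ofList h
    simpa using this
  · intro h; simp [h]

lemma pvLen_pos_iff (s : String) : (PySem.Str.len s > 0) ↔ s ≠ "" := by
  rw [gt_iff_lt, PySem.Str.len_eq]
  constructor
  · intro h hne; simp [hne] at h
  · intro h
    have h1 : s.toList ≠ [] := fun hh => h ((pvToList_eq_nil s).mp hh)
    have h2 : 0 < s.toList.length := List.length_pos_iff.mpr h1
    exact_mod_cast h2

-- the concatenation A performs adds exactly the appended word's tokens
lemma pvTokS_concat (li w : String) :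
    pvTokS (li ++ (if li ≠ "" then " " else "") ++ w) = pvTokS li + pvTokS w := by
  by_cases h : li = ""
  · subst h
    rw [if_neg (show ¬(("" : String) ≠ "") from by simp)]
    rw [pvTokS_eq, pvTokS_eq, pvTokS_eq]
    simp [pvTk]
  · simp only [h, ne_eq, not_false_iff, if_true]
    rw [pvTokS_eq, pvTokS_eq, pvTokS_eq]
    have hl : (li ++ " " ++ w).toList = li.toList ++ ' ' :: w.toList := by
      simp [String.toList_append]
    rw [hl, pvTk_append_space]
    push_cast; ring

lemma pvLen_concat (li w : String) :
    PySem.Str.len (li ++ (if li ≠ "" then " " else "") ++ w)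
      = PySem.Str.len li + (PySem.Str.len w + (if PySem.Str.len li > 0 then 1 else 0)) := by
  by_cases h : li = ""
  · subst h
    rw [if_neg (show ¬(("" : String) ≠ "") from by simp)]
    rw [if_neg (show ¬ (PySem.Str.len "" > 0) from by decide)]
    simp [PySem.Str.len_eq]
  · have hp : PySem.Str.len li > 0 := (pvLen_pos_iff li).mpr h
    simp only [h, ne_eq, not_false_iff, if_true, hp]
    simp only [PySem.Str.len_eq, String.toList_append]
    have hsp : (" " : String).toList = [' '] := rfl
    rw [hsp]
    simp [List.length_append]

def pvToksum (lines : List String) : Int := (lines.map pvTokS).sum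

lemma pvToksum_nonneg (lines : List String) : 0 ≤ pvToksum lines := by
  induction lines with
  | nil => simp [pvToksum]
  | cons x xs ih =>
    have hx := pvTokS_nonneg x
    simp only [pvToksum, List.map_cons, List.sum_cons] at *
    omega

lemma pvToksum_cons (x : String) (xs : List String) : pvToksum (x :: xs) = pvTokS x + pvToksum xs := by
  simp [pvToksum]

lemma pvToksum_append_singleton (xs : List String) (x : String) :
    pvToksum (xs ++ [x]) = pvToksum xs + pvTokS x := by
  simp [pvToksum]

lemma pvToksum_set (lines : List String) (i : Nat) (hi : i < lines.length) (x : String) :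
    pvToksum (lines.set i x) = pvToksum lines - pvTokS (lines.getD i "") + pvTokS x := by
  induction lines generalizing i with
  | nil => simp at hi
  | cons a as ih =>
    cases i with
    | zero => simp [pvToksum]; ring
    | succ j =>
      have hj : j < as.length := by simpa using hi
      simp only [List.set_cons_succ, pvToksum, List.map_cons, List.sum_cons, List.getD_cons_succ]
      have := ih j hj
      simp only [pvToksum] at this
      omega

-- a max-accumulating fold over {0, T}-valued branches is an `any`
lemma pvFold_max (T : Int) (hT : 0 ≤ T) (p q : Nat → Bool) :
    ∀ (l : List Nat) (acc : Int), (acc = 0 ∨ acc = T) →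
    l.foldl (fun acc i => if q i then max acc (if p i then T else 0) else acc) acc
      = if l.any (fun i => q i && p i) then T else acc := by
  intro l
  induction l with
  | nil => intro acc _; simp
  | cons i is ih =>
    intro acc hacc
    simp only [List.foldl_cons, List.any_cons]
    by_cases hq : q i
    · rw [if_pos hq]
      by_cases hp : p i
      · have hm : max acc (if p i = true then T else 0) = T := by
          rcases hacc with h | h <;> simp [hp, h, hT]
        rw [hm, ih T (Or.inr rfl)]
        simp [hq, hp]
      · have hm : max acc (if p i = true then T else 0) = acc := by
          rcases hacc with h | h <;> simp [hp, h, hT]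
        rw [hm, ih acc hacc]
        simp [hq, hp]
    · rw [if_neg (by simp [hq])]
      rw [ih acc hacc]
      simp [hq]

lemma pvAny_congr {α : Type} (l : List α) (p q : α → Bool) (h : ∀ x ∈ l, p x = q x) :
    l.any p = l.any q := by
  induction l with
  | nil => rfl
  | cons x xs ih =>
    simp only [List.any_cons, h x (List.mem_cons_self), ih (fun y hy => h y (List.mem_cons_of_mem x hy))]

lemma pvGetD_map_len (lines : List String) (j : Nat) (hj : j < lines.length) :
    (lines.map PySem.Str.len).getD j 0 = PySem.Str.len (lines.getD j "") := by
  rw [List.getD_eq_getElem?_getD, List.getD_eq_getElem?_getD, List.getElem?_map,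
    List.getElem?_eq_getElem hj]
  simp

-- main simulation: A's backtracking equals (B-feasible ? tokens placed + tokens to come : 0)
lemma pvBt_eq (n m : Int) : ∀ (rest : List String) (lines : List String),
    wordFitA_bt n m lines rest
      = if wordFitB_feas n m (lines.map PySem.Str.len) rest then pvToksum lines + pvToksum rest else 0 := by
  intro rest
  induction rest with
  | nil =>
    intro lines
    unfold wordFitA_bt wordFitB_feas pvToksum pvTokS
    simp
  | cons w rest' ih =>
    intro lines
    have hT : 0 ≤ pvToksum lines + (pvTokS w + pvToksum rest') := by
      have h1 := pvToksum_nonneg lines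
      have h2 := pvToksum_nonneg rest'
      have h3 := pvTokS_nonneg w
      omega
    set T : Int := pvToksum lines + (pvTokS w + pvToksum rest') with hTdef
    set used : List Int := lines.map PySem.Str.len with hused
    set p : Nat → Bool := fun j =>
      wordFitB_feas n m (used.set j (used.getD j 0 + (PySem.Str.len w + (if used.getD j 0 > 0 then 1 else 0)))) rest' with hp
    set q : Nat → Bool := fun i =>
      decide (PySem.Str.len (lines.getD i "") + PySem.Str.len w + (if lines.getD i "" ≠ "" then 1 else 0) ≤ m) with hq
    -- each in-line branch of A equals (branch feasible ? T : 0)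
    have key : ∀ i, i < lines.length →
        wordFitA_bt n m (lines.set i ((lines.getD i "") ++ (if lines.getD i "" ≠ "" then " " else "") ++ w)) rest'
          = if p i then T else 0 := by
      intro i hi
      rw [ih]
      have hmap : (lines.set i ((lines.getD i "") ++ (if lines.getD i "" ≠ "" then " " else "") ++ w)).map PySem.Str.len
          = used.set i (used.getD i 0 + (PySem.Str.len w + (if used.getD i 0 > 0 then 1 else 0))) := by
        rw [List.map_set, hused, pvGetD_map_len lines i hi, pvLen_concat]
      have hts : pvToksum (lines.set i ((lines.getD i "") ++ (if lines.getD i "" ≠ "" then " " else "") ++ w))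
          = pvToksum lines + pvTokS w := by
        rw [pvToksum_set lines i hi, pvTokS_concat]; ring
      rw [hmap, hts, hp]
      by_cases hf : wordFitB_feas n m (used.set i (used.getD i 0 + (PySem.Str.len w + (if used.getD i 0 > 0 then 1 else 0)))) rest' <;>
        simp [hf, hTdef] <;> ring
    -- A's per-line loop
    have hloop : (List.range lines.length).foldl (fun acc i =>
          let li := lines.getD i ""
          if PySem.Str.len li + PySem.Str.len w + (if li ≠ "" then 1 else 0) ≤ m then
            max acc (wordFitA_bt n m (lines.set i (li ++ (if li ≠ "" then " " else "") ++ w)) rest')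
          else acc) 0
        = if (List.range lines.length).any (fun i => q i && p i) then T else 0 := by
      have hcong := PySem.List.foldl_congr_mem (List.range lines.length)
        (fun acc i =>
          let li := lines.getD i ""
          if PySem.Str.len li + PySem.Str.len w + (if li ≠ "" then 1 else 0) ≤ m then
            max acc (wordFitA_bt n m (lines.set i (li ++ (if li ≠ "" then " " else "") ++ w)) rest')
          else acc)
        (fun acc i => if q i then max acc (if p i then T else 0) else acc)
        0 ?_
      · rw [hcong]
        exact pvFold_max T hT p q (List.range lines.length) 0 (Or.inl rfl)
      · intro acc i hi
        have hi' : i < lines.length := List.mem_range.mp hi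
        simp only [hq, decide_eq_true_eq]
        by_cases hc : PySem.Str.len (lines.getD i "") + PySem.Str.len w + (if lines.getD i "" ≠ "" then 1 else 0) ≤ m
        · rw [if_pos hc, if_pos hc, key i hi']
        · rw [if_neg hc, if_neg hc]
    -- B's per-line loop is the same `any`
    have hBloop : ((List.range used.length).any (fun j =>
          let uj := used.getD j 0
          let cost := PySem.Str.len w + (if uj > 0 then 1 else 0)
          if uj + cost ≤ m then wordFitB_feas n m (used.set j (uj + cost)) rest' else false))
        = (List.range lines.length).any (fun i => q i && p i) := by
      rw [show used.length = lines.length from by rw [hused, List.length_map]]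
      apply pvAny_congr
      intro j hj
      have hj' : j < lines.length := List.mem_range.mp hj
      have h1 : used.getD j 0 = PySem.Str.len (lines.getD j "") := by
        rw [hused]; exact pvGetD_map_len lines j hj'
      have h2 : (if used.getD j 0 > 0 then (1 : Int) else 0) = (if lines.getD j "" ≠ "" then 1 else 0) := by
        rw [h1]
        by_cases h : lines.getD j "" = ""
        · rw [if_neg (fun hh => (pvLen_pos_iff _).mp hh h), if_neg (not_not_intro h)]
        · rw [if_pos ((pvLen_pos_iff _).mpr h), if_pos h]
      simp only [hq, hp]
      by_cases hc : PySem.Str.len (lines.getD j "") + PySem.Str.len w + (if lines.getD j "" ≠ "" then 1 else 0) ≤ m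
      · have hc' : used.getD j 0 + (PySem.Str.len w + (if used.getD j 0 > 0 then 1 else 0)) ≤ m := by
          rw [h2, h1, ← add_assoc]; exact hc
        simp only [hc', if_pos, hc, decide_true, Bool.true_and]
      · have hc' : ¬ (used.getD j 0 + (PySem.Str.len w + (if used.getD j 0 > 0 then 1 else 0)) ≤ m) := by
          rw [h2, h1, ← add_assoc]; exact hc
        simp only [hc', if_neg, not_false_iff, hc, decide_false, Bool.false_and]
    -- the append branch
    have hApp : wordFitA_bt n m (lines ++ [w]) rest'
        = if wordFitB_feas n m (used ++ [PySem.Str.len w]) rest' then T else 0 := by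
      rw [ih]
      have : (lines ++ [w]).map PySem.Str.len = used ++ [PySem.Str.len w] := by
        rw [hused]; simp
      rw [this, pvToksum_append_singleton]
      by_cases hf : wordFitB_feas n m (used ++ [PySem.Str.len w]) rest' <;> simp [hf, hTdef] <;> ring
    -- assemble
    rw [wordFitA_bt, wordFitB_feas]
    simp only []
    rw [hloop, pvToksum_cons, ← hTdef]
    rw [show (lines.map PySem.Str.len) = used from rfl] at *
    rw [hBloop]
    have hlen : (used.length : Int) = (lines.length : Int) := by
      rw [show used = lines.map PySem.Str.len from rfl, List.length_map]
    by_cases ha : (List.range lines.length).any (fun i => q i && p i)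
    · simp only [ha, if_true]
      rw [hApp]
      by_cases hn : (lines.length : Int) < n
      · rw [if_pos hn]
        by_cases hf : wordFitB_feas n m (used ++ [PySem.Str.len w]) rest'
        · rw [if_pos hf, max_self]
        · rw [if_neg hf, max_eq_left hT]
      · rw [if_neg hn]
    · simp only [ha, Bool.false_eq_true, if_false]
      rw [hApp]
      by_cases hn : (lines.length : Int) < n
      · rw [if_pos hn, if_pos (show (used.length : Int) < n from by rw [hlen]; exact hn)]
        by_cases hf : wordFitB_feas n m (used ++ [PySem.Str.len w]) rest'
        · rw [if_pos hf, max_eq_right hT]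
        · rw [if_neg hf, max_self]
      · rw [if_neg hn, if_neg (show ¬ ((used.length : Int) < n) from by rw [hlen]; exact hn)]
        simp

-- ===== VERDICT (by name: the statement is the Claim_ definition above) =====
theorem word_fit_spec : Claim_equal_word_fit := by
  intro k word_list n m _
  unfold Spec_word_fit word_fit word_fit_alt
  rw [pvBt_eq]
  simp [pvToksum]
  rfl
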